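-- pv_equiv track=rewrite | github.com/Astathiel/Search-Symptoms | app/main.py | match_illnesses
-- ===== SOURCE A (Python) =====
-- def match_illnesses(input_symptoms, database, min_matches=2):  # Compare symptoms
--     """Return illnesses that share at least ``min_matches`` with ``input_symptoms``."""
--     # Convert the user supplied symptoms to lowercase and store them in a set for fast lookup
--     input_set = set(sym.lower() for sym in input_symptoms)
--     # Prepare a list that will hold tuples of (illness, number_of_matches)
--     matches = []
--
--     # Loop over each illness and its symptom list from the database
--     for illness, symptoms in database.items():
--         # Count how many of the user's symptoms are in the illness's symptom list
--         match_count = len(input_set.intersection(symptoms))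
--         # If the count meets or exceeds ``min_matches``, record this illness as a potential match
--         if match_count >= min_matches:
--             matches.append((illness, match_count))
--
--     # Sort illnesses by the number of matching symptoms in descending order and return
--     return sorted(matches, key=lambda x: -x[1])
-- ===== SOURCE B (Python) =====
-- def match_illnesses(input_symptoms, database, min_matches=2):
--     """Return illnesses that share at least ``min_matches`` with ``input_symptoms``."""
--     # Inverted index: symptom -> illnesses (in database order) whose symptom set contains it
--     index = {}
--     for illness, symptoms in database.items():
--         for s in set(symptoms):
--             index.setdefault(s, []).append(illness)
--     # Count matches per illness by walking only the input symptoms through the index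
--     counts = {}
--     for sym in set(s.lower() for s in input_symptoms):
--         for illness in index.get(sym, []):
--             counts[illness] = counts.get(illness, 0) + 1
--     matches = [(illness, counts.get(illness, 0)) for illness in database
--                if counts.get(illness, 0) >= min_matches]
--     return sorted(matches, key=lambda x: -x[1])
-- ===== Notes on version B (the rewrite author's own statement) =====
-- stated objective: alternative
-- what changed: Replaces per-illness set intersections with an inverted symptom->illnesses index plus a count dictionary incremented per input symptom, then rebuilds matches in database order.
import Mathlib
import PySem

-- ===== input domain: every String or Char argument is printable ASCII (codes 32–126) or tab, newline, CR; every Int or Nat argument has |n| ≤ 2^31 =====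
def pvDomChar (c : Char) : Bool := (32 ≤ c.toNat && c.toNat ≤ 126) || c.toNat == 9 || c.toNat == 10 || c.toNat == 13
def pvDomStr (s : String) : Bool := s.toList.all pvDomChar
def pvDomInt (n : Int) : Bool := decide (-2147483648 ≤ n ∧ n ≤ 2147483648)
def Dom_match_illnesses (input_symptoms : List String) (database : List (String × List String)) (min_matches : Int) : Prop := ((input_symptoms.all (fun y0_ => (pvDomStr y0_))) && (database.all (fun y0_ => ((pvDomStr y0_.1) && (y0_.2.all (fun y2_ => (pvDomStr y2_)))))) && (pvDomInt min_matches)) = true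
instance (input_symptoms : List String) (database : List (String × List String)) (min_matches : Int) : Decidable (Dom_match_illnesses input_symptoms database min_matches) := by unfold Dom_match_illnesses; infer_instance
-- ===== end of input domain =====

-- B replaces per-illness set intersections with an inverted symptom->illnesses index and a count
-- dictionary (alternative algorithm, same output); return-value equivalence only.


-- ===== PORT A =====
def match_illnesses (input_symptoms : List String) (database : List (String × List String)) (min_matches : Int) : List (String × Int) :=
  let inputSet : PySem.Set String := PySem.Set.ofList (input_symptoms.map PySem.Str.lower)
  let matchList : List (String × Int) := database.foldl (fun acc p =>
      let matchCount : Int := ((PySem.Set.inter inputSet p.2).length : Int)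
      if min_matches ≤ matchCount then acc ++ [(p.1, matchCount)] else acc) []
  PySem.List.sorted matchList (fun x => -x.2) false

-- ===== PORT B =====
-- B-side helpers: the inverted index (symptom -> illnesses) and the per-illness match counter
def pvIndex (database : List (String × List String)) : PySem.Dict String (List String) :=
  (database.flatMap (fun p => (PySem.Set.ofList p.2).map (fun s => (s, p.1)))).foldl
    (fun d q => d.modify q.1 [] (fun l => l ++ [q.2])) PySem.Dict.empty

def pvCounts (input_symptoms : List String) (database : List (String × List String)) : PySem.Dict String Int :=
  (PySem.Set.ofList (input_symptoms.map PySem.Str.lower)).foldl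
    (fun c sym => ((pvIndex database).getD sym []).foldl
        (fun c ill => c.insert ill (c.getD ill 0 + 1)) c)
    PySem.Dict.empty

def match_illnesses_alt (input_symptoms : List String) (database : List (String × List String)) (min_matches : Int) : List (String × Int) :=
  let counts := pvCounts input_symptoms database
  let matchList : List (String × Int) := database.flatMap (fun p =>
      let c := counts.getD p.1 0
      if min_matches ≤ c then [(p.1, c)] else [])
  PySem.List.sorted matchList (fun x => -x.2) false

-- ===== PRECONDITION & SPEC =====
-- Pre_ excludes association lists with duplicate illness keys: A's `database` is a Python dict, which cannot hold duplicate keys (a duplicated key collapses, so such lists represent no dict input of A).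
def Pre_match_illnesses (_input_symptoms : List String) (database : List (String × List String)) (_min_matches : Int) : Prop :=
  (database.map Prod.fst).Nodup
instance (input_symptoms : List String) (database : List (String × List String)) (min_matches : Int) : Decidable (Pre_match_illnesses input_symptoms database min_matches) := by unfold Pre_match_illnesses; infer_instance
def pvWitness_match_illnesses : List String × (List (String × List String)) × Int :=
  (["Cough", "fever"], [("flu", ["cough", "fever"]), ("cold", ["cough"])], 1)
def Spec_match_illnesses (input_symptoms : List String) (database : List (String × List String)) (min_matches : Int) (out : List (String × Int)) : Prop := out = match_illnesses_alt input_symptoms database min_matches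
instance (input_symptoms : List String) (database : List (String × List String)) (min_matches : Int) (out : List (String × Int)) : Decidable (Spec_match_illnesses input_symptoms database min_matches out) := by unfold Spec_match_illnesses; infer_instance

-- ===== CLAIM (what is proved, stated in full; the proofs are below) =====
def Claim_equal_match_illnesses : Prop := ∀ (input_symptoms : List String) (database : List (String × List String)) (min_matches : Int), Dom_match_illnesses input_symptoms database min_matches → Pre_match_illnesses input_symptoms database min_matches → Spec_match_illnesses input_symptoms database min_matches (match_illnesses input_symptoms database min_matches)

-- ===== LEMMAS AND PROOFS =====

-- filter of a duplicate-free list at one element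
lemma filter_beq_of_nodup {α : Type} [DecidableEq α] (l : List α) (a : α) (h : l.Nodup) :
    l.filter (· == a) = if a ∈ l then [a] else [] := by
  induction l with
  | nil => simp
  | cons x xs ih =>
    rcases List.nodup_cons.mp h with ⟨hx, hxs⟩
    by_cases hxa : x = a
    · subst hxa
      simp [ih hxs, hx]
    · simp [hxa, ih hxs, Ne.symm hxa]

-- what the inverted index holds at a symptom
lemma pvIndex_getD (database : List (String × List String)) (sym : String) :
    (pvIndex database).getD sym [] =
      database.flatMap (fun p => if p.2.contains sym then [p.1] else []) := by
  unfold pvIndex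
  rw [PySem.Dict.getD_foldl_modify_append, PySem.Dict.getD_empty]
  rw [List.filter_flatMap, List.map_flatMap]
  refine List.flatMap_congr (fun p _ => ?_)
  rw [List.filter_map]
  have : ((fun q : String × String => q.1 == sym) ∘ fun s => (s, p.1)) = (fun s => s == sym) := rfl
  rw [this, filter_beq_of_nodup _ _ (PySem.Set.nodup_ofList p.2)]
  by_cases h : sym ∈ p.2
  · simp [h, PySem.Set.mem_ofList]
  · simp [h, PySem.Set.mem_ofList]

-- an illness occurs in the index bucket exactly once iff its own symptom set has the symptom
lemma count_bucket (database : List (String × List String)) (ill : String) (syms : List String)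
    (sym : String) (hmem : (ill, syms) ∈ database) (hnd : (database.map Prod.fst).Nodup) :
    (database.flatMap (fun p => if p.2.contains sym then [p.1] else [])).count ill
      = if syms.contains sym then 1 else 0 := by
  induction database with
  | nil => simp at hmem
  | cons p rest ih =>
    rw [List.map_cons, List.nodup_cons] at hnd
    rcases hnd with ⟨hp, hrest⟩
    rcases List.mem_cons.mp hmem with heq | htail
    · subst heq
      have hzero : (rest.flatMap (fun p => if p.2.contains sym then [p.1] else [])).count ill = 0 := by
        rw [List.count_eq_zero]
        intro hmemi
        rcases List.mem_flatMap.mp hmemi with ⟨q, hq, hqi⟩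
        have hil : ill = q.1 := by
          by_cases hc : sym ∈ q.2
          · simpa [hc] using hqi
          · simp [hc] at hqi
        have hmm : ill ∈ rest.map Prod.fst := by
          rw [hil]; exact List.mem_map_of_mem hq
        exact hp hmm
      rw [List.flatMap_cons, List.count_append, hzero, Nat.add_zero]
      by_cases hc : sym ∈ syms
      · simp [hc]
      · simp [hc]
    · have hne : p.1 ≠ ill := by
        intro h
        exact hp (h ▸ (List.mem_map_of_mem htail : (ill, syms).1 ∈ rest.map Prod.fst))
      have hhead : (if p.2.contains sym then [p.1] else []).count ill = 0 := by
        by_cases hc : sym ∈ p.2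
        · simp [hc, hne]
        · simp [hc]
      rw [List.flatMap_cons, List.count_append, hhead, Nat.zero_add]
      exact ih htail hrest

-- the count dictionary agrees with A's per-illness intersection size
lemma pvCounts_getD (input_symptoms : List String) (database : List (String × List String))
    (ill : String) (syms : List String)
    (hmem : (ill, syms) ∈ database) (hnd : (database.map Prod.fst).Nodup) :
    (pvCounts input_symptoms database).getD ill 0 =
      ((PySem.Set.inter (PySem.Set.ofList (input_symptoms.map PySem.Str.lower)) syms).length : Int) := by
  unfold pvCounts
  rw [← List.foldl_flatMap, PySem.Dict.getD_foldl_insert_add_one, PySem.Dict.getD_empty,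
      List.count_flatMap, zero_add]
  have hbucket : ∀ sym : String,
      ((pvIndex database).getD sym []).count ill = if syms.contains sym then 1 else 0 := by
    intro sym
    rw [pvIndex_getD]
    exact count_bucket database ill syms sym hmem hnd
  have hmapeq :
      (PySem.Set.ofList (input_symptoms.map PySem.Str.lower)).map
          (List.count ill ∘ fun sym => (pvIndex database).getD sym [])
        = (PySem.Set.ofList (input_symptoms.map PySem.Str.lower)).map
            (fun sym => if syms.contains sym then 1 else 0) :=
    List.map_congr_left (fun sym _ => hbucket sym)
  rw [hmapeq, PySem.List.sum_map_ite_one_zero_nat, Nat.cast_inj]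
  rw [List.countP_eq_length_filter]
  rfl

-- ===== VERDICT (by name: the statement is the Claim_ definition above) =====
theorem match_illnesses_spec : Claim_equal_match_illnesses := by
  intro input_symptoms database min_matches _hdom hpre
  unfold Spec_match_illnesses match_illnesses match_illnesses_alt
  dsimp only
  congr 1
  rw [PySem.List.foldl_congr_mem' database _
        (fun acc p => acc ++ (if min_matches ≤ ((PySem.Set.inter (PySem.Set.ofList (input_symptoms.map PySem.Str.lower)) p.2).length : Int) then [(p.1, ((PySem.Set.inter (PySem.Set.ofList (input_symptoms.map PySem.Str.lower)) p.2).length : Int))] else [])) []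
        (by intro p _ acc; split_ifs <;> simp <;> omega)]
  rw [PySem.List.foldl_append_eq_flatMap, List.nil_append]
  refine List.flatMap_congr (fun p hp => ?_)
  rw [pvCounts_getD input_symptoms database p.1 p.2 hp hpre]
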